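-- pv_equiv track=rewrite | github.com/Massprod/leetcode-testing | leetcode_problems/p1190_reverse_substrings_between_each_pair_of_parentheses.py | reverse_parentheses
-- ===== SOURCE A (Python) =====
-- def reverse_parentheses(s: str) -> str:
--     # working_sol (91.13%, 81.94%) -> (30ms, 16.44mb)  time: O(s) | space: O(s)
--     opened: str = '('
--     closed: str = ')'
--     # [index of the opener]
--     openers: list[int] = []
--     # [index of the counterpart]
--     pairs: list[int] = [0 for _ in s]
--     for index in range(len(s)):
--         if opened == s[index]:
--             openers.append(index)
--         elif closed == s[index]:
--             counter_ind: int = openers.pop()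
--             pairs[index] = counter_ind
--             pairs[counter_ind] = index
--     out: list[str] = []
--     index: int = 0
--     direction: int = 1
--     # Start to move: left -> right.
--     while index < len(s):
--         # Change direction and starting position depending on what we encounter.
--         if opened == s[index] or closed == s[index]:
--             index = pairs[index]
--             direction *= -1
--         # Record every char on the path, we always maintain a correct direction => just use it.
--         else:
--             out.append(s[index])
--         index += direction
--     return ''.join(out)
-- ===== SOURCE B (Python) =====
-- def reverse_parentheses(s: str) -> str:
--     # Stack of segment builders: one list of chars per open-parenthesis level.
--     stack = [[]]
--     for char in s:
--         if char == '(':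
--             stack.append([])
--         elif char == ')':
--             top = stack.pop()
--             stack[-1].extend(reversed(top))
--         else:
--             stack[-1].append(char)
--     return ''.join(stack[0])
-- ===== Notes on version B (the rewrite author's own statement) =====
-- stated objective: simpler
-- what changed: Replaces A's two-pass scheme (precomputed pair-index table, then a bidirectional wormhole walk over it) with a single pass maintaining a stack of segment builders: '(' pushes an empty segment, ')' pops the segment, reverses it and appends it to the enclosing one.
-- outside the precondition, e.g. on reverse_parentheses('(a'): A returns 'aa', B returns ''; on reverse_parentheses('('): A returns '', B returns ''; on reverse_parentheses(')'): A raises IndexError, B raises IndexError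
import Mathlib
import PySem

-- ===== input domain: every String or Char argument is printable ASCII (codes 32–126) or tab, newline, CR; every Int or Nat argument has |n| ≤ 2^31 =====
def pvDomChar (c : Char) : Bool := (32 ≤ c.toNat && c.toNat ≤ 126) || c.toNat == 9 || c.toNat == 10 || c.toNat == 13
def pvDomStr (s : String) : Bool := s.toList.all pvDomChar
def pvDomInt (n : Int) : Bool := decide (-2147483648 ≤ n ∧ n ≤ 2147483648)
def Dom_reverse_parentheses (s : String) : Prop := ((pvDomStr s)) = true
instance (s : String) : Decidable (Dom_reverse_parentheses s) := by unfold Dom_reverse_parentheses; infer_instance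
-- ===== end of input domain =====

-- B replaces A's pair-index table + bidirectional wormhole walk by a single pass over a stack
-- of segment builders (simpler); equivalence is claimed on balanced-parentheses inputs (Pre_).

-- ===== PORT A =====

-- first pass of A: build the openers stack and the pairs table (one step of the 'for index in range(len(s))' loop)
def pairStep (cs : List Char) (acc : List Int × List Int) (index : Int) : List Int × List Int :=
  match PySem.List.pyGet? cs index with
  | none => acc              -- s[index]: unreachable, index ∈ range(len(s))
  | some c =>
    if '(' = c then (index :: acc.1, acc.2)
    else if ')' = c then
      match acc.1 with
      | [] => acc            -- Python raises IndexError here (openers.pop() on empty; outside Pre_)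
      | counter_ind :: rest =>
        (rest, PySem.List.pySetD (PySem.List.pySetD acc.2 index counter_ind) counter_ind index)
    else acc

-- A's while-loop; on balanced input it runs exactly len(s) iterations (proved below), so fuel = len(s)
def revWalk (cs : List Char) (pairs : List Int) (fuel : Nat) (index direction : Int) (out : List Char) : List Char :=
  match fuel with
  | 0 => out
  | Nat.succ f =>
    if index < (cs.length : Int) then
      match PySem.List.pyGet? cs index with
      | none => out          -- s[index] raises IndexError (index < -len; outside Pre_)
      | some c =>
        if c = '(' ∨ c = ')' then
          match PySem.List.pyGet? pairs index with
          | none => out      -- pairs[index] raises IndexError (outside Pre_)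
          | some j => revWalk cs pairs f (j - direction) (-direction) out
        else
          revWalk cs pairs f (index + direction) direction (out ++ [c])
    else out

def reverse_parentheses (s : String) : String :=
  let cs := s.toList
  let pairs0 : List Int := cs.map (fun _ => (0 : Int))
  let res := (PySem.List.pyRange 0 (cs.length : Int) 1).foldl (pairStep cs) ([], pairs0)
  String.mk (revWalk cs res.2 cs.length 0 1 [])

-- ===== PORT B =====

-- one step of B's loop; the stack's head is Python's stack[-1], its last element is stack[0]
def altStep (stack : List (List Char)) (c : Char) : List (List Char) :=
  if c = '(' then [] :: stack
  else if c = ')' then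
    match stack with
    | top :: next :: rest => (next ++ top.reverse) :: rest
    | st => st             -- Python raises IndexError here (stack underflow on unbalanced input; outside Pre_)
  else
    match stack with
    | top :: rest => (top ++ [c]) :: rest
    | [] => []             -- unreachable: the stack is never empty

def reverse_parentheses_alt (s : String) : String :=
  let st := s.toList.foldl altStep [[]]
  String.mk ((st.getLast?).getD [])   -- ''.join(stack[0]): stack[0] is the last element of the Lean-side stack

-- ===== PRECONDITION & SPEC =====

-- depth scan: pvScan d cs = final depth after cs starting at depth d, none on underflow (a stray ')')
def pvScan (d : Nat) (cs : List Char) : Option Nat :=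
  match cs with
  | [] => some d
  | c :: r =>
    if c = '(' then pvScan (d + 1) r
    else if c = ')' then (match d with | 0 => none | Nat.succ e => pvScan e r)
    else pvScan d r

-- Pre_ excludes unbalanced parentheses (the LeetCode problem guarantees balance): on a stray ')' A raises
-- IndexError, and on an unmatched '(' A either diverges or returns an accidental value produced by Python's
-- negative-index wraparound in its walk.
def Pre_reverse_parentheses (s : String) : Prop := pvScan 0 s.toList = some 0
instance (s : String) : Decidable (Pre_reverse_parentheses s) := by unfold Pre_reverse_parentheses; infer_instance

def pvWitness_reverse_parentheses : String := "(ab)"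

def Spec_reverse_parentheses (s : String) (out : String) : Prop := out = reverse_parentheses_alt s
instance (s : String) (out : String) : Decidable (Spec_reverse_parentheses s out) := by unfold Spec_reverse_parentheses; infer_instance

-- ===== CLAIM (what is proved, stated in full; the proofs are below) =====
def Claim_equal_reverse_parentheses : Prop := ∀ (s : String), Dom_reverse_parentheses s → Pre_reverse_parentheses s → Spec_reverse_parentheses s (reverse_parentheses s)

-- ===== LEMMAS AND PROOFS =====

-- the grammar of balanced strings
inductive PvBal : List Char → Prop
  | nil : PvBal []
  | chr {c : Char} {w : List Char} : c ≠ '(' → c ≠ ')' → PvBal w → PvBal (c :: w)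
  | par {u v : List Char} : PvBal u → PvBal v → PvBal ('(' :: u ++ ')' :: v)

-- "the pairs table p is correct for the balanced segment seg sitting at offset o"
inductive PvPG (p : List Int) : Nat → List Char → Prop
  | nil (o : Nat) : PvPG p o []
  | chr {c : Char} {w : List Char} {o : Nat} : c ≠ '(' → c ≠ ')' → PvPG p (o + 1) w → PvPG p o (c :: w)
  | par {u v : List Char} {o : Nat} :
      PySem.List.pyGet? p (o : Int) = some ((o : Int) + 1 + u.length) →
      PySem.List.pyGet? p ((o : Int) + 1 + u.length) = some (o : Int) →
      PvPG p (o + 1) u → PvPG p (o + u.length + 2) v → PvPG p o ('(' :: u ++ ')' :: v)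

-- B's loop output (the base segment) on a balanced string
def pvF (w : List Char) : List Char :=
  match w.foldl altStep [[]] with
  | t :: _ => t
  | [] => []

theorem pvScan_append (x y : List Char) : ∀ d, pvScan d (x ++ y) = (pvScan d x).bind (fun e => pvScan e y) := by
  induction x with
  | nil => intro d; simp [pvScan]
  | cons c r ih =>
    intro d
    by_cases h1 : c = '('
    · simp [pvScan, h1, ih]
    · by_cases h2 : c = ')'
      · cases d with
        | zero => simp [pvScan, h1, h2]
        | succ e => simp [pvScan, h1, h2, ih]
      · simp [pvScan, h1, h2, ih]

theorem pvScan_shift (x : List Char) : ∀ d e k, pvScan d x = some e → pvScan (d + k) x = some (e + k) := by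
  induction x with
  | nil => intro d e k h; simp [pvScan] at h ⊢; omega
  | cons c r ih =>
    intro d e k h
    by_cases h1 : c = '('
    · simp [pvScan, h1] at h ⊢
      have := ih (d+1) e k h
      simpa [Nat.add_right_comm] using this
    · by_cases h2 : c = ')'
      · cases d with
        | zero => simp [pvScan, h1, h2] at h
        | succ f =>
          simp [pvScan, h1, h2] at h ⊢
          have := ih f e k h
          simpa [Nat.succ_add] using this
      · simp [pvScan, h1, h2] at h ⊢
        exact ih d e k h

theorem pvScan_split_aux (n : Nat) : ∀ (w : List Char), w.length ≤ n → ∀ d, pvScan (d + 1) w = some 0 →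
    ∃ u v, w = u ++ ')' :: v ∧ pvScan 0 u = some 0 ∧ pvScan d v = some 0 := by
  induction n with
  | zero =>
    intro w hw d h
    have : w = [] := by cases w <;> simp_all
    subst this; simp [pvScan] at h
  | succ n ih =>
    intro w hw d h
    cases w with
    | nil => simp [pvScan] at h
    | cons c r =>
      by_cases h1 : c = '('
      · subst h1
        simp [pvScan] at h
        obtain ⟨u1, v1, hr, hu1, hv1⟩ := ih r (by simpa using Nat.le_of_succ_le_succ hw) (d + 1) h
        have hv1len : v1.length ≤ n := by
          have : r.length ≤ n := by simpa using Nat.le_of_succ_le_succ hw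
          subst hr; simp at this; omega
        obtain ⟨u2, v2, hv1e, hu2, hv2⟩ := ih v1 (by omega) d hv1
        refine ⟨'(' :: u1 ++ ')' :: u2, v2, ?_, ?_, hv2⟩
        · subst hr hv1e; simp
        · show pvScan 0 ('(' :: (u1 ++ ')' :: u2)) = some 0
          have hsh : pvScan 1 u1 = some 1 := by
            have := pvScan_shift u1 0 0 1 hu1; simpa using this
          simp only [pvScan, if_pos rfl]
          rw [show (0+1 : Nat) = 1 from rfl, pvScan_append u1 (')' :: u2) 1, hsh]
          simp [pvScan, hu2]
      · by_cases h2 : c = ')'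
        · subst h2
          simp [pvScan] at h
          exact ⟨[], r, by simp, by simp [pvScan], h⟩
        · simp [pvScan, h1, h2] at h
          obtain ⟨u1, v1, hr, hu1, hv1⟩ := ih r (by simpa using Nat.le_of_succ_le_succ hw) d h
          exact ⟨c :: u1, v1, by simp [hr], by simp [pvScan, h1, h2, hu1], hv1⟩

theorem pvBal_of_scan_aux (n : Nat) : ∀ (w : List Char), w.length ≤ n → pvScan 0 w = some 0 → PvBal w := by
  induction n with
  | zero =>
    intro w hw _
    have : w = [] := by cases w <;> simp_all
    subst this; exact PvBal.nil
  | succ n ih =>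
    intro w hw h
    cases w with
    | nil => exact PvBal.nil
    | cons c r =>
      by_cases h1 : c = '('
      · subst h1
        simp [pvScan] at h
        obtain ⟨u, v, hr, hu, hv⟩ := pvScan_split_aux n r (by simpa using Nat.le_of_succ_le_succ hw) 0 h
        have hrlen : r.length ≤ n := by simpa using Nat.le_of_succ_le_succ hw
        have hul : u.length ≤ n := by subst hr; simp at hrlen; omega
        have hvl : v.length ≤ n := by subst hr; simp at hrlen; omega
        subst hr
        exact PvBal.par (ih u hul hu) (ih v hvl hv)
      · by_cases h2 : c = ')'
        · subst h2; simp [pvScan] at h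
        · simp [pvScan, h1, h2] at h
          exact PvBal.chr h1 h2 (ih r (by simpa using Nat.le_of_succ_le_succ hw) h)

theorem altStep_open (st : List (List Char)) : altStep st '(' = [] :: st := by simp [altStep]
theorem altStep_close (t n : List Char) (r : List (List Char)) :
    altStep (t :: n :: r) ')' = (n ++ t.reverse) :: r := by simp [altStep]
theorem altStep_other {c : Char} (h1 : c ≠ '(') (h2 : c ≠ ')') (t : List Char) (r : List (List Char)) :
    altStep (t :: r) c = (t ++ [c]) :: r := by simp [altStep, h1, h2]

theorem alt_fold_bal {w : List Char} (h : PvBal w) :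
    ∀ (top : List Char) (rest : List (List Char)),
      List.foldl altStep (top :: rest) w = (top ++ pvF w) :: rest := by
  induction h with
  | nil => intro top rest; simp [pvF, altStep]
  | chr h1 h2 hw ih =>
    rename_i c w'
    intro top rest
    have hF : pvF (c :: w') = c :: pvF w' := by
      simp only [pvF, List.foldl_cons, altStep_other h1 h2]
      rw [ih ([] ++ [c]) []]
      simp only [List.nil_append]
      rfl
    rw [hF]
    simp only [List.foldl_cons, altStep_other h1 h2]
    rw [ih (top ++ [c]) rest]
    simp
  | par hu hv ihu ihv =>
    rename_i u v
    intro top rest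
    have key : ∀ (t : List Char) (r : List (List Char)),
        List.foldl altStep (t :: r) ('(' :: u ++ ')' :: v) = (t ++ ((pvF u).reverse ++ pvF v)) :: r := by
      intro t r
      rw [List.cons_append, List.foldl_cons, altStep_open, List.foldl_append, ihu [] (t :: r),
        List.foldl_cons, List.nil_append, altStep_close, ihv (t ++ (pvF u).reverse) r]
      simp
    have hF : pvF ('(' :: u ++ ')' :: v) = (pvF u).reverse ++ pvF v := by
      simp only [pvF]
      rw [key [] []]
      simp only [List.nil_append]
      rfl
    rw [hF, key top rest]

theorem PvPG_bal {p : List Int} {o : Nat} {w : List Char} (h : PvPG p o w) : PvBal w := by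
  induction h with
  | nil => exact PvBal.nil
  | chr h1 h2 _ ih => exact PvBal.chr h1 h2 ih
  | par _ _ _ _ ihu ihv => exact PvBal.par ihu ihv

theorem PvPG_frame {p p' : List Int} {o : Nat} {w : List Char} (h : PvPG p o w)
    (hf : ∀ x : Nat, o ≤ x → x < o + w.length → p'[x]? = p[x]?) : PvPG p' o w := by
  induction h with
  | nil o => exact PvPG.nil o
  | @chr c w' o' h1 h2 _ ih =>
    refine PvPG.chr h1 h2 (ih ?_)
    intro x hx1 hx2
    exact hf x (by omega) (by simp; omega)
  | @par u v o' hg1 hg2 _ _ ihu ihv =>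
    have len : ('(' :: u ++ ')' :: v).length = u.length + v.length + 2 := by simp; omega
    refine PvPG.par ?_ ?_ (ihu ?_) (ihv ?_)
    · rw [show ((o' : Int)) = ((o' : Nat) : Int) from rfl, PySem.List.pyGet?_natCast,
        hf o' le_rfl (by rw [len]; omega)]
      rw [← PySem.List.pyGet?_natCast, hg1]
    · rw [show ((o' : Int) + 1 + u.length) = ((o' + 1 + u.length : Nat) : Int) by push_cast; ring,
        PySem.List.pyGet?_natCast, hf (o' + 1 + u.length) (by omega) (by rw [len]; omega)]
      rw [← PySem.List.pyGet?_natCast]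
      rw [show (((o' + 1 + u.length : Nat) : Int)) = ((o' : Int) + 1 + u.length) by push_cast; ring, hg2]
    · intro x hx1 hx2
      exact hf x (by omega) (by rw [len]; omega)
    · intro x hx1 hx2
      exact hf x (by omega) (by rw [len]; omega)

theorem revWalk_step_paren {gs : List Char} {p : List Int} (f : Nat) {k : Nat} (hk : k < gs.length)
    {c : Char} (hc : gs[k]? = some c) (hpar : c = '(' ∨ c = ')')
    {j : Int} (hp : PySem.List.pyGet? p (k : Int) = some j) (d : Int) (out : List Char) :
    revWalk gs p (f + 1) (k : Int) d out = revWalk gs p f (j - d) (-d) out := by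
  show revWalk gs p (Nat.succ f) _ _ _ = _
  rw [revWalk]
  rw [if_pos (by exact_mod_cast hk)]
  rw [PySem.List.pyGet?_natCast, hc]
  simp only [if_pos hpar, hp]

theorem revWalk_step_chr {gs : List Char} {p : List Int} (f : Nat) {k : Nat} (hk : k < gs.length)
    {c : Char} (hc : gs[k]? = some c) (h1 : ¬(c = '(' ∨ c = ')')) (d : Int) (out : List Char) :
    revWalk gs p (f + 1) (k : Int) d out = revWalk gs p f ((k : Int) + d) d (out ++ [c]) := by
  show revWalk gs p (Nat.succ f) _ _ _ = _
  rw [revWalk]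
  rw [if_pos (by exact_mod_cast hk)]
  rw [PySem.List.pyGet?_natCast, hc]
  simp only [if_neg h1]

theorem pairStep_open {gs : List Char} {k : Nat} (hc : gs[k]? = some '(') (acc : List Int × List Int) :
    pairStep gs acc (k : Int) = ((k : Int) :: acc.1, acc.2) := by
  unfold pairStep
  rw [PySem.List.pyGet?_natCast, hc]
  simp

theorem pairStep_close {gs : List Char} {k : Nat} (hc : gs[k]? = some ')') (i : Int) (rest : List Int) (p : List Int) :
    pairStep gs (i :: rest, p) (k : Int)
      = (rest, PySem.List.pySetD (PySem.List.pySetD p (k : Int) i) i (k : Int)) := by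
  unfold pairStep
  rw [PySem.List.pyGet?_natCast, hc]
  simp

theorem pairStep_other {gs : List Char} {k : Nat} {c : Char} (hc : gs[k]? = some c)
    (h1 : c ≠ '(') (h2 : c ≠ ')') (acc : List Int × List Int) :
    pairStep gs acc (k : Int) = acc := by
  unfold pairStep
  rw [PySem.List.pyGet?_natCast, hc]
  simp [Ne.symm h1, Ne.symm h2]

theorem pvRange_nat_cons {a b : Nat} (h : a < b) :
    PySem.List.pyRange (a : Int) (b : Int) 1 = (a : Int) :: PySem.List.pyRange ((a + 1 : Nat) : Int) (b : Int) 1 := by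
  rw [PySem.List.pyRange_one_cons (by exact_mod_cast h)]
  congr 1 <;> omega

theorem pvRange_nat_append (a m b : Nat) (h1 : a ≤ m) (h2 : m ≤ b) :
    PySem.List.pyRange (a : Int) (b : Int) 1
      = PySem.List.pyRange (a : Int) (m : Int) 1 ++ PySem.List.pyRange (m : Int) (b : Int) 1 :=
  PySem.List.pyRange_one_append _ _ _ (by exact_mod_cast h1) (by exact_mod_cast h2)

theorem pvIdx_congr {α : Type} (xs : List α) {i j : Nat} (h : i = j) : xs[i]? = xs[j]? := by rw [h]

theorem pass_seg {gs : List Char} {seg : List Char} (hb : PvBal seg) :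
    ∀ (o : Nat) (st : List Int) (p : List Int),
      p.length = gs.length →
      (∀ k : Nat, k < seg.length → gs[o + k]? = seg[k]?) →
      o + seg.length ≤ gs.length →
      ∃ p', (PySem.List.pyRange (o : Int) ((o + seg.length : Nat) : Int) 1).foldl (pairStep gs) (st, p) = (st, p') ∧
        p'.length = gs.length ∧
        (∀ x : Nat, (x < o ∨ o + seg.length ≤ x) → p'[x]? = p[x]?) ∧
        PvPG p' o seg := by
  induction hb with
  | nil =>
    intro o st p hlen hchars hb
    refine ⟨p, ?_, hlen, fun x _ => rfl, PvPG.nil o⟩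
    rw [PySem.List.pyRange_one_eq_nil (by simp)]
    rfl
  | @chr c w h1 h2 hw ih =>
    intro o st p hlen hchars hb
    rw [List.length_cons] at hchars hb ⊢
    have hco : gs[o]? = some c := by simpa using hchars 0 (by omega)
    obtain ⟨p', hfold, hplen, hframe, hpg⟩ := ih (o + 1) st p hlen
      (fun k hk => by
        have h := hchars (k + 1) (by omega)
        simp at h
        rw [pvIdx_congr gs (show (o + 1) + k = o + (k + 1) by omega)]
        exact h)
      (by omega)
    refine ⟨p', ?_, hplen, ?_, PvPG.chr h1 h2 hpg⟩
    · rw [show o + (w.length + 1) = (o + 1) + w.length by omega,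
        pvRange_nat_cons (show o < (o + 1) + w.length by omega), List.foldl_cons,
        pairStep_other hco h1 h2, hfold]
    · intro x hx
      exact hframe x (by omega)
  | @par u v hu hv ihu ihv =>
    intro o st p hlen hchars hb
    have e : ('(' :: u ++ ')' :: v).length = u.length + v.length + 2 := by
      simp [List.length_append]; omega
    rw [e] at hchars hb ⊢
    have hcons : ('(' :: u ++ ')' :: v) = '(' :: (u ++ ')' :: v) := by simp
    have hco : gs[o]? = some '(' := by
      have h := hchars 0 (by omega); simpa [hcons] using h
    have hcc : gs[o + 1 + u.length]? = some ')' := by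
      have h := hchars (1 + u.length) (by omega)
      rw [hcons] at h
      simp [List.getElem?_cons, List.getElem?_append_right] at h
      rw [pvIdx_congr gs (show o + 1 + u.length = o + (1 + u.length) by omega)]
      exact h
    have hcharsU : ∀ k : Nat, k < u.length → gs[(o + 1) + k]? = u[k]? := by
      intro k hk
      have h := hchars (k + 1) (by omega)
      rw [hcons] at h
      simp [List.getElem?_cons, List.getElem?_append_left hk] at h
      rw [pvIdx_congr gs (show (o + 1) + k = o + (k + 1) by omega)]
      exact h
    have hcharsV : ∀ k : Nat, k < v.length → gs[(o + u.length + 2) + k]? = v[k]? := by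
      intro k hk
      have h := hchars (u.length + 2 + k) (by omega)
      rw [hcons] at h
      have h2 : ('(' :: (u ++ ')' :: v))[u.length + 2 + k]? = v[k]? := by
        simp only [List.getElem?_cons]
        rw [if_neg (by omega)]
        rw [pvIdx_congr (u ++ ')' :: v) (show u.length + 2 + k - 1 = u.length + (k + 1) by omega)]
        rw [List.getElem?_append_right (by omega)]
        simp [show u.length + (k + 1) - u.length = k + 1 by omega]
      rw [h2] at h
      rw [pvIdx_congr gs (show (o + u.length + 2) + k = o + (u.length + 2 + k) by omega)]
      exact h
    obtain ⟨p1, hfold1, hplen1, hframe1, hpg1⟩ := ihu (o + 1) ((o : Int) :: st) p hlen hcharsU (by omega)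
    set i1 : Nat := o + 1 + u.length with hi1
    have hp2 : PySem.List.pySetD (PySem.List.pySetD p1 (i1 : Int) (o : Int)) (o : Int) (i1 : Int)
        = (p1.set i1 (o : Int)).set o (i1 : Int) := by
      simp [PySem.List.pySetD_natCast]
    obtain ⟨p3, hfold3, hplen3, hframe3, hpg3⟩ := ihv (o + u.length + 2) st
      ((p1.set i1 (o : Int)).set o (i1 : Int)) (by simp [hplen1]) hcharsV (by omega)
    have hoLt : o < p1.length := by omega
    have hi1Lt : i1 < p1.length := by omega
    refine ⟨p3, ?_, hplen3, ?_, ?_⟩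
    · rw [pvRange_nat_cons (show o < o + (u.length + v.length + 2) by omega), List.foldl_cons,
        pairStep_open hco,
        pvRange_nat_append (o + 1) ((o + 1) + u.length) (o + (u.length + v.length + 2)) (by omega) (by omega),
        List.foldl_append, hfold1,
        pvRange_nat_cons (show (o + 1) + u.length < o + (u.length + v.length + 2) by omega),
        List.foldl_cons]
      rw [show ((o + 1) + u.length : Nat) = i1 by omega]
      rw [pairStep_close hcc, hp2]
      rw [show (i1 + 1 : Nat) = o + u.length + 2 by omega,
        show (o + (u.length + v.length + 2) : Nat) = (o + u.length + 2) + v.length by omega, hfold3]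
    · intro x hx
      rw [hframe3 x (by omega)]
      rw [List.getElem?_set_ne (by omega), List.getElem?_set_ne (by omega)]
      exact hframe1 x (by omega)
    · have hAt : ∀ x : Nat, x < o + u.length + 2 → p3[x]? = ((p1.set i1 (o : Int)).set o (i1 : Int))[x]? := by
        intro x hx; exact hframe3 x (by omega)
      refine PvPG.par ?_ ?_ ?_ hpg3
      · rw [show ((o : Int)) = ((o : Nat) : Int) from rfl, PySem.List.pyGet?_natCast, hAt o (by omega),
          List.getElem?_set_self (by simpa using hoLt)]
        congr 1 <;> omega
      · rw [show ((o : Int) + 1 + u.length) = ((i1 : Nat) : Int) by push_cast [hi1]; ring,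
          PySem.List.pyGet?_natCast, hAt i1 (by omega),
          List.getElem?_set_ne (by omega), List.getElem?_set_self (by simpa using hi1Lt)]
      · refine PvPG_frame hpg1 ?_
        intro x hx1 hx2
        rw [hAt x (by omega), List.getElem?_set_ne (by omega), List.getElem?_set_ne (by omega)]

theorem pvF_chr {c : Char} {w : List Char} (h1 : c ≠ '(') (h2 : c ≠ ')') (hw : PvBal w) :
    pvF (c :: w) = c :: pvF w := by
  simp only [pvF, List.foldl_cons, altStep_other h1 h2]
  rw [alt_fold_bal hw ([] ++ [c]) []]
  simp only [List.nil_append]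
  rfl

theorem pvF_par {u v : List Char} (hu : PvBal u) (hv : PvBal v) :
    pvF ('(' :: u ++ ')' :: v) = (pvF u).reverse ++ pvF v := by
  simp only [pvF, List.cons_append, List.foldl_cons, altStep_open]
  rw [List.foldl_append, alt_fold_bal hu [] [[]], List.foldl_cons, List.nil_append, altStep_close,
    alt_fold_bal hv ([] ++ (pvF u).reverse) []]
  simp only [List.nil_append]
  rfl

theorem walk_seg {gs : List Char} {p : List Int} {o : Nat} {seg : List Char} (hpg : PvPG p o seg) :
    (∀ k : Nat, k < seg.length → gs[o + k]? = seg[k]?) →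
    o + seg.length ≤ gs.length →
    (∀ (f : Nat) (out : List Char),
        revWalk gs p (seg.length + f) (o : Int) 1 out
          = revWalk gs p f ((o + seg.length : Nat) : Int) 1 (out ++ pvF seg)) ∧
    (∀ (f : Nat) (out : List Char),
        revWalk gs p (seg.length + f) ((o : Int) + seg.length - 1) (-1) out
          = revWalk gs p f ((o : Int) - 1) (-1) (out ++ (pvF seg).reverse)) := by
  induction hpg with
  | nil o' =>
    intro hchars hlen
    constructor <;> intro f out <;> simp [pvF, altStep]
  | @chr c w o' h1 h2 hw ih =>
    intro hchars hlen
    rw [List.length_cons] at hchars hlen ⊢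
    have hco : gs[o']? = some c := by simpa using hchars 0 (by omega)
    have hoLt : o' < gs.length := by omega
    have hFc : pvF (c :: w) = c :: pvF w := pvF_chr h1 h2 (PvPG_bal hw)
    have hnp : ¬(c = '(' ∨ c = ')') := by simp [h1, h2]
    obtain ⟨fwdW, bwdW⟩ := ih
      (fun k hk => by
        have h := hchars (k + 1) (by omega)
        simp at h
        rw [pvIdx_congr gs (show (o' + 1) + k = o' + (k + 1) by omega)]
        exact h)
      (by omega)
    constructor
    · intro f out
      rw [show w.length + 1 + f = (w.length + f) + 1 by omega,
        revWalk_step_chr (w.length + f) hoLt hco hnp 1 out,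
        show ((o' : Int) + 1) = ((o' + 1 : Nat) : Int) by omega,
        fwdW f (out ++ [c]),
        show ((o' + 1) + w.length : Nat) = o' + (w.length + 1) by omega,
        hFc]
      simp
    · intro f out
      rw [show w.length + 1 + f = w.length + (1 + f) by omega,
        show ((o' : Int) + ↑(w.length + 1) - 1) = (((o' + 1 : Nat) : Int) + ↑w.length - 1) by push_cast; ring,
        bwdW (1 + f) out,
        show (((o' + 1 : Nat) : Int) - 1) = ((o' : Nat) : Int) by push_cast; ring,
        show 1 + f = f + 1 by omega,
        revWalk_step_chr f hoLt hco hnp (-1) (out ++ (pvF w).reverse),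
        hFc]
      simp [sub_eq_add_neg]
  | @par u v o' hg1 hg2 hu hv ihu ihv =>
    intro hchars hlen
    have e : ('(' :: u ++ ')' :: v).length = u.length + v.length + 2 := by
      simp [List.length_append]; omega
    rw [e] at hchars hlen ⊢
    have hcons : ('(' :: u ++ ')' :: v) = '(' :: (u ++ ')' :: v) := by simp
    have hco : gs[o']? = some '(' := by
      have h := hchars 0 (by omega); simpa [hcons] using h
    have hcc : gs[o' + 1 + u.length]? = some ')' := by
      have h := hchars (1 + u.length) (by omega)
      rw [hcons] at h
      simp [List.getElem?_cons, List.getElem?_append_right] at h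
      rw [pvIdx_congr gs (show o' + 1 + u.length = o' + (1 + u.length) by omega)]
      exact h
    have hcharsU : ∀ k : Nat, k < u.length → gs[(o' + 1) + k]? = u[k]? := by
      intro k hk
      have h := hchars (k + 1) (by omega)
      rw [hcons] at h
      simp [List.getElem?_cons, List.getElem?_append_left hk] at h
      rw [pvIdx_congr gs (show (o' + 1) + k = o' + (k + 1) by omega)]
      exact h
    have hcharsV : ∀ k : Nat, k < v.length → gs[(o' + u.length + 2) + k]? = v[k]? := by
      intro k hk
      have h := hchars (u.length + 2 + k) (by omega)
      rw [hcons] at h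
      have h2 : ('(' :: (u ++ ')' :: v))[u.length + 2 + k]? = v[k]? := by
        simp only [List.getElem?_cons]
        rw [if_neg (by omega)]
        rw [pvIdx_congr (u ++ ')' :: v) (show u.length + 2 + k - 1 = u.length + (k + 1) by omega)]
        rw [List.getElem?_append_right (by omega)]
        simp [show u.length + (k + 1) - u.length = k + 1 by omega]
      rw [h2] at h
      rw [pvIdx_congr gs (show (o' + u.length + 2) + k = o' + (u.length + 2 + k) by omega)]
      exact h
    have hoLt : o' < gs.length := by omega
    have hi1Lt : o' + 1 + u.length < gs.length := by omega
    have hg2' : PySem.List.pyGet? p ((o' + 1 + u.length : Nat) : Int) = some ((o' : Nat) : Int) := by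
      rw [show ((o' + 1 + u.length : Nat) : Int) = ((o' : Int) + 1 + u.length) by push_cast; ring]
      exact hg2
    have hF : pvF ('(' :: u ++ ')' :: v) = (pvF u).reverse ++ pvF v := pvF_par (PvPG_bal hu) (PvPG_bal hv)
    obtain ⟨fwdU, bwdU⟩ := ihu hcharsU (by omega)
    obtain ⟨fwdV, bwdV⟩ := ihv hcharsV (by omega)
    rw [hF]
    constructor
    · intro f out
      rw [show u.length + v.length + 2 + f = (u.length + (1 + (v.length + f))) + 1 by omega,
        revWalk_step_paren (u.length + (1 + (v.length + f))) hoLt hco (Or.inl rfl) hg1 1 out,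
        show ((o' : Int) + 1 + ↑u.length - 1) = (((o' + 1 : Nat) : Int) + ↑u.length - 1) by push_cast; ring,
        show (-(1 : Int)) = -1 by norm_num,
        bwdU (1 + (v.length + f)) out,
        show (((o' + 1 : Nat) : Int) - 1) = ((o' : Nat) : Int) by push_cast; ring,
        show 1 + (v.length + f) = (v.length + f) + 1 by omega,
        revWalk_step_paren (v.length + f) hoLt hco (Or.inl rfl) hg1 (-1) (out ++ (pvF u).reverse),
        show ((o' : Int) + 1 + ↑u.length - (-1)) = ((o' + u.length + 2 : Nat) : Int) by push_cast; ring,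
        show (-(-1 : Int)) = 1 by norm_num,
        fwdV f (out ++ (pvF u).reverse),
        show ((o' + u.length + 2) + v.length : Nat) = o' + (u.length + v.length + 2) by omega]
      simp
    · intro f out
      rw [show u.length + v.length + 2 + f = v.length + (1 + (u.length + (1 + f))) by omega,
        show ((o' : Int) + ↑(u.length + v.length + 2) - 1)
          = (((o' + u.length + 2 : Nat) : Int) + ↑v.length - 1) by push_cast; ring,
        bwdV (1 + (u.length + (1 + f))) out,
        show (((o' + u.length + 2 : Nat) : Int) - 1) = ((o' + 1 + u.length : Nat) : Int) by push_cast; ring,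
        show 1 + (u.length + (1 + f)) = (u.length + (1 + f)) + 1 by omega,
        revWalk_step_paren (u.length + (1 + f)) hi1Lt hcc (Or.inr rfl) hg2' (-1) (out ++ (pvF v).reverse),
        show (((o' : Nat) : Int) - (-1)) = (((o' + 1 : Nat)) : Int) by push_cast; ring,
        show (-(-1 : Int)) = 1 by norm_num,
        fwdU (1 + f) (out ++ (pvF v).reverse),
        show 1 + f = f + 1 by omega,
        show (((o' + 1) + u.length : Nat) : Int) = ((o' + 1 + u.length : Nat) : Int) by omega,
        revWalk_step_paren f hi1Lt hcc (Or.inr rfl) hg2' 1 ((out ++ (pvF v).reverse) ++ pvF u),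
        show (((o' : Nat) : Int) - 1) = ((o' : Int) - 1) by push_cast; ring,
        show (-(1 : Int)) = -1 by norm_num]
      simp


-- ===== VERDICT (by name: the statement is the Claim_ definition above) =====
theorem reverse_parentheses_spec : Claim_equal_reverse_parentheses := by
  intro s _ hpre
  show reverse_parentheses s = reverse_parentheses_alt s
  have hbal : PvBal s.toList := pvBal_of_scan_aux s.toList.length s.toList le_rfl hpre
  obtain ⟨p', hfold, hplen, _, hpg⟩ := pass_seg (gs := s.toList) hbal 0 [] (s.toList.map fun _ => (0 : Int))
    (by simp) (fun k hk => by simp) (by omega)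
  obtain ⟨fwd, _⟩ := walk_seg (gs := s.toList) hpg (fun k hk => by simp) (by omega)
  have hwalk := fwd 0 []
  simp only [Nat.cast_zero, Nat.zero_add, Nat.add_zero] at hfold hwalk
  unfold reverse_parentheses reverse_parentheses_alt
  simp only [hfold, alt_fold_bal hbal [] [], List.nil_append]
  rw [hwalk]
  simp [revWalk]
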